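-- pv_equiv track=rewrite | github.com/YoonDii/ALGORITHM | 프로그래머스/lv0/120844. 배열 회전시키기/배열 회전시키기.py | solution
-- ===== SOURCE A (Python) =====
-- from collections import deque
--
-- def solution(numbers, direction):
--     answer = []
--     q = deque(numbers)
--     if direction ==  'right':
--         q.rotate(1)
--     else:
--         q.rotate(-1)
--     for i in q:
--         answer.append(i)
--
--     return answer
-- ===== SOURCE B (Python) =====
-- def solution(numbers, direction):
--     n = len(numbers)
--     if n == 0:
--         return []
--     s = n - 1 if direction == 'right' else 1
--     return [numbers[(i + s) % n] for i in range(n)]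
-- ===== Notes on version B (the rewrite author's own statement) =====
-- stated objective: alternative
-- what changed: Instead of rotating a deque and copying it out element by element, B computes each output position directly by modular index arithmetic: result[i] = numbers[(i + shift) % n] with shift n-1 for right and 1 for left.
import Mathlib
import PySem

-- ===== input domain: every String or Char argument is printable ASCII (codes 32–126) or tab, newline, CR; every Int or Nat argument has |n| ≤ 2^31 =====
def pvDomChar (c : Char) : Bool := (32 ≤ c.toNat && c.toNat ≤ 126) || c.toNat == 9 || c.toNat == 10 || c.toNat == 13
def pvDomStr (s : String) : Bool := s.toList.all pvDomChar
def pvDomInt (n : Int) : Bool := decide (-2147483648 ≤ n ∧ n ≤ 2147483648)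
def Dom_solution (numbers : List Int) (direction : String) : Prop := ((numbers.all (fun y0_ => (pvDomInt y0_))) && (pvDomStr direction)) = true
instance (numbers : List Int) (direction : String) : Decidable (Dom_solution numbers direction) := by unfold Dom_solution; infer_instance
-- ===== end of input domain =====

-- B drops the deque rotate + copy loop: each output position is computed directly
-- by modular index arithmetic (result[i] = numbers[(i+shift) % n]).

-- ===== PORT A =====
-- deque.rotate(1): move the last element to the front (no-op on the empty deque)
def pvDequeRotate1 (l : List Int) : List Int :=
  match l.getLast? with
  | none => l
  | some x => x :: l.dropLast

-- deque.rotate(-1): move the first element to the back (no-op on the empty deque)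
def pvDequeRotateNeg1 (l : List Int) : List Int :=
  match l with
  | [] => []
  | x :: xs => xs ++ [x]

def solution (numbers : List Int) (direction : String) : List Int :=
  let q := if direction == "right" then pvDequeRotate1 numbers else pvDequeRotateNeg1 numbers
  q.foldl (fun answer i => answer ++ [i]) []

-- ===== PORT B =====
-- numbers[(i+s) % n] is always in range (0 ≤ (i+s) % n < n, n > 0), so pyGetD's default is never used
def solution_alt (numbers : List Int) (direction : String) : List Int :=
  let n : Int := numbers.length
  if n == 0 then []
  else
    let s : Int := if direction == "right" then n - 1 else 1
    (PySem.List.pyRange 0 n 1).map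
      (fun i => PySem.List.pyGetD numbers (PySem.Int.mod (i + s) n) 0)

-- ===== PRECONDITION & SPEC =====
def Spec_solution (numbers : List Int) (direction : String) (out : List Int) : Prop := out = solution_alt numbers direction
instance (numbers : List Int) (direction : String) (out : List Int) : Decidable (Spec_solution numbers direction out) := by unfold Spec_solution; infer_instance

-- ===== CLAIM (what is proved, stated in full; the proofs are below) =====
def Claim_equal_solution : Prop := ∀ (numbers : List Int) (direction : String), Dom_solution numbers direction → Spec_solution numbers direction (solution numbers direction)

-- ===== LEMMAS AND PROOFS =====
theorem pv_copy (l acc : List Int) : l.foldl (fun answer i => answer ++ [i]) acc = acc ++ l := by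
  induction l generalizing acc with
  | nil => simp
  | cons x xs ih => simp [List.foldl, ih]

-- B's modular-index map is exactly Mathlib's left-rotation by s
theorem pv_map_mod_eq_rotate (l : List Int) (s : Nat) (hl : l ≠ []) :
    (PySem.List.pyRange 0 (l.length : Int) 1).map
      (fun i => PySem.List.pyGetD l (PySem.Int.mod (i + (s : Int)) (l.length : Int)) 0)
    = l.rotate s := by
  have hlen : 0 < l.length := List.length_pos_iff.mpr hl
  rw [PySem.List.pyRange_one]
  simp only [sub_zero, Int.toNat_natCast, List.map_map]
  apply List.ext_getElem
  · simp [List.length_rotate]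
  · intro k hk1 hk2
    simp only [List.getElem_map, List.getElem_range, Function.comp_apply]
    have hcast : ((0 : Int) + (k : Int)) + (s : Int) = (((k + s : Nat)) : Int) := by push_cast; ring
    rw [hcast, PySem.Int.mod_natCast]
    rw [PySem.List.pyGetD_natCast]
    rw [List.getD_eq_getElem _ _ (by exact Nat.mod_lt _ hlen)]
    rw [List.getElem_rotate]

theorem pv_rotR_eq_rotate (l : List Int) (hl : l ≠ []) :
    pvDequeRotate1 l = l.rotate (l.length - 1) := by
  rcases List.eq_nil_or_concat l with h | ⟨ys, a, h⟩
  · exact absurd h hl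
  · subst h
    rw [List.rotate_eq_drop_append_take (by simp)]
    simp [pvDequeRotate1]

theorem pv_rotL_eq_rotate (l : List Int) (hl : l ≠ []) :
    pvDequeRotateNeg1 l = l.rotate 1 := by
  cases l with
  | nil => exact absurd rfl hl
  | cons x xs =>
    rw [List.rotate_eq_drop_append_take (by simp)]
    simp [pvDequeRotateNeg1]

-- ===== VERDICT (by name: the statement is the Claim_ definition above) =====
theorem solution_spec : Claim_equal_solution := by
  intro numbers direction _
  unfold Spec_solution solution solution_alt
  by_cases hn : numbers = []
  · subst hn
    by_cases h : direction == "right" <;>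
      simp [h, pvDequeRotate1, pvDequeRotateNeg1]
  · have hlen : 0 < numbers.length := List.length_pos_iff.mpr hn
    have hne : ((numbers.length : Int) == 0) = false := by
      simp; omega
    by_cases h : direction == "right"
    · have hs : ((numbers.length : Int) - 1) = ((numbers.length - 1 : Nat) : Int) := by
        push_cast [Nat.cast_sub hlen]; ring
      simp only [h, hne, if_true, if_false, Bool.false_eq_true, pv_copy, List.nil_append]
      rw [hs, pv_map_mod_eq_rotate numbers (numbers.length - 1) hn,
        pv_rotR_eq_rotate numbers hn]
    · simp only [h, hne, if_false, Bool.false_eq_true, pv_copy, List.nil_append]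
      rw [pv_rotL_eq_rotate numbers hn, ← pv_map_mod_eq_rotate numbers 1 hn]
      norm_num
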